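-- pv_equiv track=rewrite | github.com/dianatalpos/Fundamentals-of-Programming | written exam/divideConquer.py | sum
-- ===== SOURCE A (Python) =====
-- def sum(list):
--     if len(list) <2 :
--         return 0
--     if len(list) == 2:
--         if list[0] % 2 == 0:
--             return list[0]
--         else:
--             return 0
--
--     mid = len(list)//2
--     if len(list)%2 == 1:
--         list = list + [0]
--     if mid%2 == 1:
--         s1 = sum(list[:mid-1])
--         s2 = sum(list[mid-1:])
--     else:
--         s1 = sum(list[:mid])
--         s2 = sum(list[mid:])
--
--     return s1+s2
-- ===== SOURCE B (Python) =====
-- def sum(list):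
--     # One flat pass with a parity flag: add even-valued elements at even indices.
--     total = 0
--     at_even_index = True
--     for x in list:
--         if at_even_index and x % 2 == 0:
--             total += x
--         at_even_index = not at_even_index
--     return total
-- ===== Notes on version B (the rewrite author's own statement) =====
-- stated objective: faster
-- what changed: Replaced A's divide-and-conquer recursion with slicing (and zero-padding of odd-length lists) by one flat left-to-right pass keeping a running total and an index-parity flag.
-- intended difference: On single-element lists whose element is even and nonzero, A's len<2 guard returns 0 while B returns that element, which is the intended sum of even-valued elements at even indices. — e.g. on sum([2]): A returns 0, B returns 2
import Mathlib
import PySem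

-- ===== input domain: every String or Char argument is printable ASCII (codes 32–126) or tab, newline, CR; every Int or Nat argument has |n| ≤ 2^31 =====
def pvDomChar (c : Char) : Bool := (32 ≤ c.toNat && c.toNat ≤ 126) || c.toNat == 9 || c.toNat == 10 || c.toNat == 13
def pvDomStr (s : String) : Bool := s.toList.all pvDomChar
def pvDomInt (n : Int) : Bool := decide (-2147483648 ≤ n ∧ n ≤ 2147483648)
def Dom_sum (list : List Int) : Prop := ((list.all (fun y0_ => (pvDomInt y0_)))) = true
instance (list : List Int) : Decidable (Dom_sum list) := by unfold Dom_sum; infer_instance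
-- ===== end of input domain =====

-- B replaces A's divide-and-conquer slicing recursion by one flat pass with an
-- index-parity flag (objective: faster); on a one-element list holding an even
-- nonzero value A returns 0 where B returns the element (see D_sum below).

-- ===== PORT A =====
-- Literal port of A. The recursion is run on structural fuel (a totality guard only:
-- pvMeasure below bounds the recursion depth, and list.length + 2 fuel always suffices —
-- proved in sumFuel_eq_g / sum_spec). len // 2 and len % 2 on the nonnegative length are
-- Nat / and % (exact: Python floor division on nonnegative operands); the slices list[:k]
-- and list[k:] with the nonnegative in-range k used here are take/drop (exact).
def sumFuel : Nat → List Int → Int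
  | 0, _ => 0
  | fuel + 1, list =>
    if list.length < 2 then 0
    else if list.length = 2 then
      if PySem.Int.mod (PySem.List.pyGetD list 0 0) 2 = 0 then PySem.List.pyGetD list 0 0 else 0
    else
      let mid := list.length / 2
      let l := if list.length % 2 = 1 then list ++ [0] else list
      if mid % 2 = 1 then
        sumFuel fuel (l.take (mid - 1)) + sumFuel fuel (l.drop (mid - 1))
      else
        sumFuel fuel (l.take mid) + sumFuel fuel (l.drop mid)

def sum (list : List Int) : Int := sumFuel (list.length + 2) list

-- ===== PORT B =====
-- Literal port of Source B: one foldl over the list carrying (total, at_even_index).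
def sum_alt (list : List Int) : Int :=
  (list.foldl
    (fun (st : Int × Bool) x =>
      (if st.2 ∧ PySem.Int.mod x 2 = 0 then st.1 + x else st.1, !st.2))
    (0, true)).1

-- ===== PRECONDITION & SPEC =====
-- On one-element lists whose element is even and nonzero A's len<2 guard returns 0,
-- while B returns that element, the intended sum of even values at even indices.
def D_sum (list : List Int) : Prop :=
  list.length = 1 ∧ PySem.Int.mod list.headI 2 = 0 ∧ list.headI ≠ 0
instance (list : List Int) : Decidable (D_sum list) := by unfold D_sum; infer_instance

def Spec_sum (list : List Int) (out : Int) : Prop := ¬ D_sum list → out = sum_alt list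
instance (list : List Int) (out : Int) : Decidable (Spec_sum list out) := by unfold Spec_sum; infer_instance

def pvDiffWitness_sum : List Int := [2]
def pvDiffWitnessOut_sum : Int × Int := (0, 2)

-- ===== CLAIM (what is proved, stated in full; the proofs are below) =====
def Claim_unchanged_sum : Prop := ∀ (list : List Int), Dom_sum list → Spec_sum list (sum list)
def Claim_changed_sum : Prop := Dom_sum (pvDiffWitness_sum) ∧ D_sum (pvDiffWitness_sum) ∧ sum (pvDiffWitness_sum) = pvDiffWitnessOut_sum.1 ∧ sum_alt (pvDiffWitness_sum) = pvDiffWitnessOut_sum.2 ∧ pvDiffWitnessOut_sum.1 ≠ pvDiffWitnessOut_sum.2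
def Claim_exact_sum : Prop := ∀ (list : List Int), Dom_sum list → D_sum list → sum list ≠ sum_alt list

-- ===== LEMMAS AND PROOFS =====

-- The specification value: sum of even-valued elements at even indices.
def g : List Int → Int
  | [] => 0
  | [a] => if PySem.Int.mod a 2 = 0 then a else 0
  | a :: _ :: rest => (if PySem.Int.mod a 2 = 0 then a else 0) + g rest

theorem g_append_even (l1 l2 : List Int) (h : l1.length % 2 = 0) :
    g (l1 ++ l2) = g l1 + g l2 := by
  induction l1 using g.induct with
  | case1 => simp [g]
  | case2 a ha => simp at h
  | case3 a ha => simp at h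
  | case4 a b rest ih =>
    simp only [List.length_cons] at h
    simp only [List.cons_append, g, ih (by omega)]
    ring

theorem g_pad (l : List Int) : g (l ++ [0]) = g l := by
  induction l using g.induct with
  | case1 => simp [g, PySem.Int.mod]
  | case2 a ha => simp [g]
  | case3 a ha => simp [g]
  | case4 a b rest ih => simpa [g] using ih

theorem sum_alt_inv (l : List Int) (t : Int) :
    (l.foldl
      (fun (st : Int × Bool) x =>
        (if st.2 ∧ PySem.Int.mod x 2 = 0 then st.1 + x else st.1, !st.2))
      (t, true)).1 = t + g l := by
  induction l using g.induct generalizing t with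
  | case1 => simp [g]
  | case2 a ha =>
    rw [PySem.Int.mod_eq_zero_iff_dvd] at ha
    simp [List.foldl, g, ha]
  | case3 a ha =>
    rw [PySem.Int.mod_eq_zero_iff_dvd] at ha
    simp [List.foldl, g, ha]
  | case4 a b rest ih =>
    simp only [PySem.Int.mod_eq_zero_iff_dvd] at ih
    by_cases ha : (2:Int) ∣ a
    · simp [List.foldl, g, ha, ih, add_assoc]
    · simp [List.foldl, g, ha, ih]

theorem sum_alt_eq_g (l : List Int) : sum_alt l = g l := by
  rw [sum_alt, sum_alt_inv l 0, zero_add]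

-- Termination measure of A's recursion: from a length-3 list the recursion passes
-- through the zero-padded length-4 list, so plain length does not bound the depth.
def pvMeasure (n : Nat) : Nat := if n = 3 then 5 else n

theorem sumFuel_nil (f : Nat) : sumFuel f [] = 0 := by cases f <;> simp [sumFuel]

theorem sumFuel_eq_g (fuel : Nat) : ∀ (l : List Int),
    pvMeasure l.length ≤ fuel → 2 ≤ l.length → sumFuel fuel l = g l := by
  induction fuel with
  | zero =>
    intro l hm h2
    exfalso
    unfold pvMeasure at hm
    split_ifs at hm <;> omega
  | succ fuel ih =>
    intro l hm h2
    rw [sumFuel]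
    rcases Nat.lt_or_ge l.length 3 with h3 | h3
    · have h2' : l.length = 2 := by omega
      match l, h2' with
      | [a, b], _ => simp [g, PySem.List.pyGetD_zero_cons]
    · have hlt : ¬ l.length < 2 := by omega
      have hne : ¬ l.length = 2 := by omega
      simp only [if_neg hlt, if_neg hne]
      set mid := l.length / 2 with hmid
      set l' := if l.length % 2 = 1 then l ++ [0] else l with hl'
      have hA : l'.length % 2 = 0 := by
        rw [hl']; split
        · simp; omega
        · omega
      have hB : l.length ≤ l'.length := by rw [hl']; split <;> simp
      have hC : l'.length ≤ l.length + 1 := by rw [hl']; split <;> simp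
      have hgl' : g l' = g l := by
        rw [hl']; split
        · exact g_pad l
        · rfl
      have hpiece : ∀ k : Nat, k % 2 = 0 → mid - 1 ≤ k → k ≤ mid →
          sumFuel fuel (l'.take k) + sumFuel fuel (l'.drop k) = g l' := by
        intro k hk hk1 hk2
        have hkle : k ≤ l'.length := by omega
        have htk : (l'.take k).length = k := by simp [List.length_take]; omega
        have hdk : (l'.drop k).length = l'.length - k := by simp
        have hμ1 : pvMeasure (l'.take k).length ≤ fuel := by
          unfold pvMeasure at hm ⊢
          rw [htk]
          split_ifs at hm ⊢ <;> omega
        have hμ2 : pvMeasure (l'.drop k).length ≤ fuel := by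
          unfold pvMeasure at hm ⊢
          rw [hdk]
          split_ifs at hm ⊢ <;> omega
        have h1 : sumFuel fuel (l'.take k) = g (l'.take k) := by
          rcases Nat.eq_zero_or_pos k with rfl | hkpos
          · simp [g, sumFuel_nil]
          · exact ih (l'.take k) hμ1 (by omega)
        have h2' : sumFuel fuel (l'.drop k) = g (l'.drop k) := by
          exact ih (l'.drop k) hμ2 (by omega)
        rw [h1, h2', ← g_append_even (l'.take k) (l'.drop k) (by omega), List.take_append_drop]
      split
      · rename_i hmo
        rw [hpiece (mid - 1) (by omega) (by omega) (by omega), hgl']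
      · rename_i hme
        rw [hpiece mid (by omega) (by omega) (by omega), hgl']

theorem sum_eq_g (l : List Int) (h : 2 ≤ l.length) : sum l = g l := by
  refine sumFuel_eq_g _ l ?_ h
  unfold pvMeasure; split_ifs <;> omega

-- ===== VERDICT (by name: the statement is the Claim_ definition above) =====
theorem sum_spec : Claim_unchanged_sum := by
  intro l _ hD
  rcases Nat.lt_or_ge l.length 2 with h | h
  · -- length 0 or 1
    match l, h with
    | [], _ => simp [sum, sumFuel, sum_alt]
    | [a], _ =>
      have hna : ¬ (PySem.Int.mod a 2 = 0 ∧ a ≠ 0) := by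
        intro ⟨h1, h2⟩; exact hD ⟨rfl, h1, h2⟩
      have hsum : sum [a] = 0 := by simp [sum, sumFuel]
      rw [hsum, sum_alt_eq_g]
      by_cases he : PySem.Int.mod a 2 = 0
      · have ha0 : a = 0 := by tauto
        subst ha0; simp [g]
      · rw [PySem.Int.mod_eq_zero_iff_dvd] at he
        simp [g, he]
  · rw [sum_eq_g l h, sum_alt_eq_g]

theorem sum_changed : Claim_changed_sum := by unfold Claim_changed_sum; decide

theorem sum_tight : Claim_exact_sum := by
  intro l _ hD
  obtain ⟨h1, h2, h3⟩ := hD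
  match l, h1 with
  | [a], _ =>
    simp only [List.headI] at h2 h3
    have hsum : sum [a] = 0 := by simp [sum, sumFuel]
    have hg : g [a] = a := by simp only [g, if_pos h2]
    rw [hsum, sum_alt_eq_g, hg]
    intro hh
    exact h3 hh.symm
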